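-- pv_equiv track=rewrite | github.com/dlmv/qcldm | basis/basis_creator.py | estimate_ion_valence_shells
-- ===== SOURCE A (Python) =====
-- from operator import itemgetter
--
-- SHELLS = 'spdfghi'
--
-- ELEMENTS = 'n', \
--            'H', 'He', \
--            'Li', 'Be',  'B',  'C',  'N',  'O',  'F', 'Ne', \
--            'Na', 'Mg', 'Al', 'Si',  'P',  'S', 'Cl', 'Ar', \
--            'K',  'Ca', 'Sc', 'Ti',  'V', 'Cr', 'Mn', 'Fe', 'Co', 'Ni', \
--            'Cu', 'Zn', 'Ga', 'Ge', 'As', 'Se', 'Br', 'Kr', \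
--            'Rb', 'Sr',  'Y', 'Zr', 'Nb', 'Mo', 'Tc', 'Ru', 'Rh', 'Pd', \
--            'Ag', 'Cd', 'In', 'Sn', 'Sb', 'Te',  'I', 'Xe', \
--            'Cs', 'Ba', 'La', \
--            'Ce', 'Pr', 'Nd', 'Pm', 'Sm', 'Eu', 'Gd', 'Tb', 'Dy', 'Ho', 'Er', 'Tm', 'Yb', 'Lu', \
--                              'Hf', 'Ta',  'W', 'Re', 'Os', 'Ir', 'Pt', \
--            'Au', 'Hg', 'Tl', 'Pb', 'Bi', 'Po', 'At', 'Rn', \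
--            'Fr', 'Ra', 'Ac', \
--            'Th', 'Pa', 'U', 'Np', 'Pu', 'Am', 'Cm', 'Bk', 'Cf', 'Es', 'Fm', 'Md', 'No', 'Lr', \
--                              'Rf', 'Db', 'Sg', 'Bh', 'Hs', 'Mt', 'Ds', \
--            'Rg', 'Cn', 'Nh', 'Fl', 'Mc', 'Lv', 'Ts', 'Og'
--
-- def aufbau_sequence():
-- 	nl = 1
-- 	while True:
-- 		for l in reversed(list(range(nl))):
-- 			n = nl - l
-- 			if n > l:
-- 				yield n, l
-- 		nl += 1
--
-- def estimate_configuration(atom_number):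
-- 	configuration = {}
-- 	i = 0
-- 	for n, l in aufbau_sequence():
-- 		shell_occ = 4*l + 2
-- 		if i + shell_occ < atom_number:
-- 			configuration[(n,l)] = shell_occ
-- 			i += shell_occ
-- 		else:
-- 			configuration[(n,l)] = atom_number - i
-- 			break
-- 	return configuration
--
-- def estimate_valence_configuration(atom_number):
-- 	configuration = estimate_configuration(atom_number)
-- 	nmax = 0
-- 	valence_configuration = []
-- 	for n, l in aufbau_sequence():
-- 		if not (n, l) in configuration.keys():
-- 			break
-- 		if n > nmax:
-- 			valence_configuration = []
-- 		nmax = max(n, nmax)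
-- 		if l == 0 or configuration[(n,l)] != 4*l + 2:
-- 			valence_configuration.append([n, l, configuration[(n,l)]])
-- 		if l == 1 and configuration[(n,l)] == 6:
-- 			valence_configuration = []
-- 	return valence_configuration
--
-- def estimate_ion_valence_shells(atom_number, charge=0):
-- 	valence_configuration = estimate_valence_configuration(atom_number)
-- 	if charge:
-- 		valence_configuration_map = {}
-- 		for n, l, occ in valence_configuration:
-- 			valence_configuration_map[(n, l)] = occ
-- 		keys = valence_configuration_map.keys()
-- 		for e in range(charge):
-- 			for n, l in sorted(keys, key=itemgetter(0,1), reverse=True):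
-- 				if valence_configuration_map[(n, l)] > 0:
-- 					valence_configuration_map[(n, l)] -= 1
-- 					break
-- 		for conf_part in valence_configuration:
-- 			n, l, occ = conf_part
-- 			conf_part[2] = valence_configuration_map[(n, l)]
-- 	spin = 0
-- 	valence = 0
-- 	valence_string = ''
-- 	for n, l, occ in valence_configuration:
-- 		if occ:
-- 			s = min(occ, 4*l + 2 - occ)
-- 			spin += s
-- 			valence += occ
-- 			valence_string += '.%d%s%d' % (n, SHELLS[l], occ)
-- 	core_num = atom_number - valence - charge
-- 	valence_string = '[%s]' % ELEMENTS[core_num] + valence_string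
-- 	return valence, valence_string, spin
-- ===== SOURCE B (Python) =====
-- SHELLS = ('s', 'p', 'd', 'f', 'g', 'h', 'i')
--
-- ELEMENTS = ('n H He Li Be B C N O F Ne Na Mg Al Si P S Cl Ar K Ca Sc Ti V Cr Mn Fe Co Ni '
--             'Cu Zn Ga Ge As Se Br Kr Rb Sr Y Zr Nb Mo Tc Ru Rh Pd Ag Cd In Sn Sb Te I Xe '
--             'Cs Ba La Ce Pr Nd Pm Sm Eu Gd Tb Dy Ho Er Tm Yb Lu Hf Ta W Re Os Ir Pt '
--             'Au Hg Tl Pb Bi Po At Rn Fr Ra Ac Th Pa U Np Pu Am Cm Bk Cf Es Fm Md No Lr '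
--             'Rf Db Sg Bh Hs Mt Ds Rg Cn Nh Fl Mc Lv Ts Og').split()
--
--
-- def _shell_order():
--     """Aufbau order: shells grouped by m = n + l ascending, n ascending inside a group."""
--     m = 1
--     while True:
--         for n in range(m // 2 + 1, m + 1):
--             yield n, m - n
--         m += 1
--
--
-- def _occupations(atom_number):
--     """Fill shells greedily; the last shell gets whatever electrons remain."""
--     shells = []
--     remaining = atom_number
--     for n, l in _shell_order():
--         cap = 4 * l + 2
--         if remaining > cap:
--             shells.append([n, l, cap])
--             remaining -= cap
--         else:
--             shells.append([n, l, remaining])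
--             return shells
--
--
-- def _valence(shells):
--     """Valence shells = suffix after the last 'reset' (new max n, or a filled p shell),
--     keeping only s shells and partially filled ones."""
--     start = 0
--     nmax = 0
--     for i, (n, l, occ) in enumerate(shells):
--         if n > nmax:
--             start = i
--             nmax = n
--         if l == 1 and occ == 6:
--             start = i + 1
--     return [p for p in shells[start:] if p[1] == 0 or p[2] != 4 * p[1] + 2]
--
--
-- def estimate_ion_valence_shells(atom_number, charge=0):
--     shells = _valence(_occupations(atom_number))
--     if charge:
--         remaining = charge
--         for part in sorted(shells, key=lambda p: (p[0], p[1]), reverse=True):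
--             if remaining <= 0:
--                 break
--             r = min(remaining, part[2])
--             part[2] -= r           # aliases the entry in `shells`
--             remaining -= r
--     parts = [(n, l, occ) for n, l, occ in shells if occ]
--     valence = sum(occ for _, _, occ in parts)
--     spin = sum(min(occ, 4 * l + 2 - occ) for _, l, occ in parts)
--     valence_string = '[%s]' % ELEMENTS[atom_number - valence - charge] + \
--         ''.join('.%d%s%d' % (n, SHELLS[l], occ) for n, l, occ in parts)
--     return valence, valence_string, spin
-- ===== Notes on version B (the rewrite author's own statement) =====
-- stated objective: alternative
-- what changed: B rebuilds the pipeline with different algorithms throughout: shells generated by (n+l, n) ascending instead of the reversed-range generator, occupancies kept as a plain list instead of a dict, valence shells obtained as the suffix after the last reset point instead of a clear-and-append loop, and the charge removed in one descending pass taking min(remaining, occ) per shell instead of charge-many rescans of the sorted map; tallies become filter + sums + join instead of one accumulating loop.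
-- outside the precondition, e.g. on estimate_ion_valence_shells(-1, 6): A returns (-1, '[Nh].1s-1', -1), B returns (0, '[Cn]', 0); on estimate_ion_valence_shells(0, 0): A returns (0, '[n]', 0), B returns (0, '[n]', 0); on estimate_ion_valence_shells(6, -113): A returns (4, '[Mc].2s2.2p2', 2), B returns (4, '[Mc].2s2.2p2', 2)
import Mathlib
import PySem

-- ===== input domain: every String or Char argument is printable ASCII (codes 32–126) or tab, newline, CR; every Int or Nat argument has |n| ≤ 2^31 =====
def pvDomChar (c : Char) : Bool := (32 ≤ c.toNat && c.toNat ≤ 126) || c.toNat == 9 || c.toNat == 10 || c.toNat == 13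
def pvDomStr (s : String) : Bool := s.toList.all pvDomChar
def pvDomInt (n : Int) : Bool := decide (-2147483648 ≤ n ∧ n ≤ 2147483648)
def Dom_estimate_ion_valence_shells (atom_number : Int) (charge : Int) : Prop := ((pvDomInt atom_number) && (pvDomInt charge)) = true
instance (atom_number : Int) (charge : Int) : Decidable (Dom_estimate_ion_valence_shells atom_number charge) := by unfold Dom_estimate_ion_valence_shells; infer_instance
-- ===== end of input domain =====

-- B recomputes the whole pipeline differently: shells generated by (n+l, n) ascending instead
-- of the reversed-range generator, occupancies kept as a plain list instead of a dict, the
-- valence shells found as the suffix after the last reset point instead of a clear-and-append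
-- loop, and the charge removed in ONE descending pass (min(remaining, occ) per shell) instead
-- of charge-many rescans; tallies become filter + sums + join instead of one accumulating loop.

-- ===== PORT A =====
-- shared module constants of Source A

def pvSHELLS : String := "spdfghi"

def pvELEMENTS : List String := ["n", "H", "He", "Li", "Be", "B", "C", "N", "O", "F", "Ne", "Na", "Mg", "Al", "Si", "P", "S", "Cl", "Ar", "K", "Ca", "Sc", "Ti", "V", "Cr", "Mn", "Fe", "Co", "Ni", "Cu", "Zn", "Ga", "Ge", "As", "Se", "Br", "Kr", "Rb", "Sr", "Y", "Zr", "Nb", "Mo", "Tc", "Ru", "Rh", "Pd", "Ag", "Cd", "In", "Sn", "Sb", "Te", "I", "Xe", "Cs", "Ba", "La", "Ce", "Pr", "Nd", "Pm", "Sm", "Eu", "Gd", "Tb", "Dy", "Ho", "Er", "Tm", "Yb", "Lu", "Hf", "Ta", "W", "Re", "Os", "Ir", "Pt", "Au", "Hg", "Tl", "Pb", "Bi", "Po", "At", "Rn", "Fr", "Ra", "Ac", "Th", "Pa", "U", "Np", "Pu", "Am", "Cm", "Bk", "Cf", "Es", "Fm", "Md", "No", "Lr", "Rf", "Db", "Sg",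 "Bh", "Hs", "Mt", "Ds", "Rg", "Cn", "Nh", "Fl", "Mc", "Lv", "Ts", "Og"]

-- aufbau_sequence() is an infinite generator; both Pythons consume only a short prefix.
-- 10 rows (shells up to n+l = 10) cover every atom_number admitted by Pre_ (≤ 118) with room to spare.
def aufbauSeq : List (Int × Int) :=
  (List.range 10).flatMap (fun k =>
    (List.range (k + 1)).reverse.filterMap (fun l =>
      let n : Int := (k : Int) + 1 - (l : Int)
      if n > (l : Int) then some (n, (l : Int)) else none))

-- estimate_configuration's loop (break returns the dict after the last insert)
def econfLoop : List (Int × Int) → Int → Int → PySem.Dict (Int × Int) Int → PySem.Dict (Int × Int) Int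
  | [], _, _, conf => conf
  | (n, l) :: rest, i, a, conf =>
      let shell_occ := 4 * l + 2
      if i + shell_occ < a then econfLoop rest (i + shell_occ) a (conf.insert (n, l) shell_occ)
      else conf.insert (n, l) (a - i)

def estimate_configuration (atom_number : Int) : PySem.Dict (Int × Int) Int :=
  econfLoop aufbauSeq 0 atom_number .empty

-- estimate_valence_configuration's loop over the aufbau sequence
def evalcLoop : List (Int × Int) → PySem.Dict (Int × Int) Int → Int → List (Int × Int × Int) → List (Int × Int × Int)
  | [], _, _, vc => vc
  | (n, l) :: rest, conf, nmax, vc =>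
      match conf.get? (n, l) with
      | none => vc
      | some c =>
          let vc1 := if n > nmax then [] else vc
          let nmax1 := max n nmax
          let vc2 := if l = 0 ∨ c ≠ 4 * l + 2 then vc1 ++ [(n, l, c)] else vc1
          let vc3 := if l = 1 ∧ c = 6 then [] else vc2
          evalcLoop rest conf nmax1 vc3

def estimate_valence_configuration (atom_number : Int) : List (Int × Int × Int) :=
  evalcLoop aufbauSeq (estimate_configuration atom_number) 0 []

-- '.%d%s%d' % (n, SHELLS[l], occ); SHELLS[l] is exact for the 0 ≤ l < 7 reached under Pre_
def pvPartStr (t : Int × Int × Int) : String :=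
  "." ++ PySem.Int.toStr t.1 ++ ((PySem.Str.pyGet? pvSHELLS t.2.1).map String.singleton).getD "" ++ PySem.Int.toStr t.2.2

-- 'for n, l, occ in valence_configuration: valence_configuration_map[(n, l)] = occ'
def pvVcMap (vc : List (Int × Int × Int)) : PySem.Dict (Int × Int) Int :=
  vc.foldl (fun d t => d.insert (t.1, t.2.1) t.2.2) .empty

-- inner 'for n, l in sorted(keys, key=itemgetter(0,1), reverse=True): … break'
def removeOne : List (Int × Int) → PySem.Dict (Int × Int) Int → PySem.Dict (Int × Int) Int
  | [], m => m
  | k :: rest, m =>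
      if m.getD k 0 > 0 then m.modify k 0 (· - 1)
      else removeOne rest m

-- 'for e in range(charge): …' (A re-sorts the unchanged key set on every iteration)
def ionLoopA (charge : Int) (m0 : PySem.Dict (Int × Int) Int) : PySem.Dict (Int × Int) Int :=
  (PySem.List.pyRange 0 charge 1).foldl
    (fun m _ => removeOne (PySem.List.sorted2 m.keys (·.1) (·.2) true) m) m0

def estimate_ion_valence_shells (atom_number : Int) (charge : Int) : Int × String × Int :=
  let vc := estimate_valence_configuration atom_number
  let vc' :=
    if charge ≠ 0 then
      let m := ionLoopA charge (pvVcMap vc)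
      vc.map (fun t => (t.1, t.2.1, m.getD (t.1, t.2.1) 0))
    else vc
  let acc := vc'.foldl (fun acc t =>
      if t.2.2 ≠ 0 then
        (acc.1 + min t.2.2 (4 * t.2.1 + 2 - t.2.2), acc.2.1 + t.2.2, acc.2.2 ++ pvPartStr t)
      else acc) ((0 : Int), (0 : Int), "")
  let valence := acc.2.1
  -- ELEMENTS[core_num] is exact (incl. Python's negative-index wrap) for the indices Pre_ admits
  let valence_string :=
    "[" ++ (PySem.List.pyGet? pvELEMENTS (atom_number - valence - charge)).getD "" ++ "]" ++ acc.2.2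
  (valence, valence_string, acc.1)

-- ===== PORT B =====
-- Source B's module constants: SHELLS is a tuple of letters, ELEMENTS a split string

def pvShellLettersB : List String := ["s", "p", "d", "f", "g", "h", "i"]

def pvElemsB : List String := PySem.Str.split₀ ("n H He Li Be B C N O F Ne Na Mg Al Si P S Cl Ar K Ca Sc Ti V Cr Mn Fe Co Ni " ++ "Cu Zn Ga Ge As Se Br Kr Rb Sr Y Zr Nb Mo Tc Ru Rh Pd Ag Cd In Sn Sb Te I Xe " ++ "Cs Ba La Ce Pr Nd Pm Sm Eu Gd Tb Dy Ho Er Tm Yb Lu Hf Ta W Re Os Ir Pt " ++ "Au Hg Tl Pb Bi Po At Rn Fr Ra Ac Th Pa U Np Pu Am Cm Bk Cf Es Fm Md No Lr " ++ "Rf Db Sg Bh Hs Mt Ds Rg Cn Nh Fl Mc Lv Ts Og")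

-- _shell_order(): shells grouped by m = n + l ascending, n ascending inside a group;
-- like A's generator it is infinite in Python — 10 groups cover everything Pre_ admits.
def shellOrderB : List (Int × Int) :=
  (List.range 10).flatMap (fun k =>
    let m : Int := (k : Int) + 1
    (PySem.List.pyRange (PySem.Int.floordiv m 2 + 1) (m + 1) 1).map (fun n => (n, m - n)))

-- _occupations: greedy fill, last shell takes the remainder
def occLoopB : List (Int × Int) → Int → List (Int × Int × Int)
  | [], _ => []
  | (n, l) :: rest, remaining =>
      let cap := 4 * l + 2
      if remaining > cap then (n, l, cap) :: occLoopB rest (remaining - cap)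
      else [(n, l, remaining)]

def occupationsB (atom_number : Int) : List (Int × Int × Int) :=
  occLoopB shellOrderB atom_number

-- _valence's enumerate loop computing the last reset point
def startLoopB : List (Int × Int × Int) → Nat → Nat → Int → Nat
  | [], start, _, _ => start
  | (n, l, occ) :: rest, start, i, nmax =>
      let p := if n > nmax then (i, n) else (start, nmax)
      let start2 := if l = 1 ∧ occ = 6 then i + 1 else p.1
      startLoopB rest start2 (i + 1) p.2

def valenceB (shells : List (Int × Int × Int)) : List (Int × Int × Int) :=
  (shells.drop (startLoopB shells 0 0 0)).filter (fun p => p.2.1 == 0 || p.2.2 != 4 * p.2.1 + 2)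

-- the single descending drain pass; Python's 'break' leaves later entries untouched,
-- which is the remaining ≤ 0 branch here (r = 0)
def drainB : List (Int × Int × Int) → Int → List ((Int × Int) × Int)
  | [], _ => []
  | (n, l, occ) :: rest, remaining =>
      if remaining ≤ 0 then ((n, l), occ) :: drainB rest remaining
      else
        let r := min remaining occ
        ((n, l), occ - r) :: drainB rest (remaining - r)

-- Python B mutates the shell entries through aliases in the sorted copy; keys are distinct,
-- so the port reads the drained value back by first-match lookup (default never used)
def lookupB (d : List ((Int × Int) × Int)) (k : Int × Int) (dflt : Int) : Int :=
  match d.find? (fun p => p.1 == k) with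
  | some p => p.2
  | none => dflt

def estimate_ion_valence_shells_alt (atom_number : Int) (charge : Int) : Int × String × Int :=
  let shells := valenceB (occupationsB atom_number)
  let shells' :=
    if charge ≠ 0 then
      let d := drainB (PySem.List.sorted2 shells (·.1) (·.2.1) true) charge
      shells.map (fun p => (p.1, p.2.1, lookupB d (p.1, p.2.1) p.2.2))
    else shells
  let parts := shells'.filter (fun p => p.2.2 ≠ 0)
  let valence := (parts.map (fun p => p.2.2)).sum
  let spin := (parts.map (fun p => min p.2.2 (4 * p.2.1 + 2 - p.2.2))).sum
  let partStr := fun (p : Int × Int × Int) =>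
    "." ++ PySem.Int.toStr p.1 ++ (PySem.List.pyGet? pvShellLettersB p.2.1).getD "" ++ PySem.Int.toStr p.2.2
  let valence_string :=
    "[" ++ (PySem.List.pyGet? pvElemsB (atom_number - valence - charge)).getD "" ++ "]"
      ++ PySem.Str.join "" (parts.map partStr)
  (valence, valence_string, spin)

-- ===== PRECONDITION & SPEC =====
-- Pre_ keeps atom_number inside the periodic table (1..118) — outside it the 'occupancies'
-- are zero or negative and how a charge interacts with such fictitious shells is anybody's
-- choice (A leaves a negative shell untouched, B's min(remaining, occ) cancels it) — and it
-- conservatively bounds the charge so ELEMENTS[core_num] never raises IndexError (a margin of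
-- that bound still returns, with the same value from both programs).
def Pre_estimate_ion_valence_shells (atom_number : Int) (charge : Int) : Prop :=
  1 ≤ atom_number ∧ atom_number ≤ 118 ∧ atom_number - 118 ≤ charge ∧ charge ≤ atom_number + 119
instance (atom_number : Int) (charge : Int) : Decidable (Pre_estimate_ion_valence_shells atom_number charge) := by
  unfold Pre_estimate_ion_valence_shells; infer_instance

def pvWitness_estimate_ion_valence_shells : Int × Int := (26, 2)

def Spec_estimate_ion_valence_shells (atom_number : Int) (charge : Int) (out : Int × String × Int) : Prop := out = estimate_ion_valence_shells_alt atom_number charge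
instance (atom_number : Int) (charge : Int) (out : Int × String × Int) : Decidable (Spec_estimate_ion_valence_shells atom_number charge out) := by unfold Spec_estimate_ion_valence_shells; infer_instance

-- ===== CLAIM (what is proved, stated in full; the proofs are below) =====
def Claim_equal_estimate_ion_valence_shells : Prop := ∀ (atom_number : Int) (charge : Int), Dom_estimate_ion_valence_shells atom_number charge → Pre_estimate_ion_valence_shells atom_number charge → Spec_estimate_ion_valence_shells atom_number charge (estimate_ion_valence_shells atom_number charge)

-- ===== LEMMAS AND PROOFS =====

-- proof-side bridge: batch removal over a key list (the common form both charge blocks reduce to)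
def batchRemove : List (Int × Int) → Int → PySem.Dict (Int × Int) Int → PySem.Dict (Int × Int) Int
  | [], _, m => m
  | k :: rest, t, m =>
      if t ≤ 0 then m
      else
        let r := min t (m.getD k 0)
        batchRemove rest (t - r) (m.modify k 0 (· - r))

def pvKey (t : Int × Int × Int) : Int × Int := (t.1, t.2.1)

-- everything about one atom number that the main proof needs, as one decidable check
def pvBundle (a : Int) : Bool :=
  let vc := estimate_valence_configuration a
  let m := pvVcMap vc
  let ts := PySem.List.sorted2 vc (·.1) (·.2.1) true
  (vc == valenceB (occupationsB a)) &&
  (PySem.List.sorted2 m.keys (·.1) (·.2) true == ts.map pvKey) &&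
  (ts.map pvKey).Nodup &&
  ts.all (fun t => m.getD (pvKey t) 0 == t.2.2) &&
  vc.all (fun t => 0 ≤ t.2.2 && 0 ≤ t.2.1 && t.2.1 < 7)

set_option maxRecDepth 40000 in
theorem pv_bundle_ok : ∀ k ∈ List.range 118, pvBundle ((k : Int) + 1) = true := by decide

set_option maxRecDepth 40000 in
theorem pv_elems_eq : pvElemsB = pvELEMENTS := by decide

-- ---- A's per-electron loop equals batchRemove over the (unchanging) sorted key list ----

theorem pv_batch_nonpos (ks : List (Int × Int)) (t : Int) (m : PySem.Dict (Int × Int) Int)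
    (h : t ≤ 0) : batchRemove ks t m = m := by
  cases ks with
  | nil => rfl
  | cons k rest => simp [batchRemove, h]

theorem pv_contains_of_getD_pos (m : PySem.Dict (Int × Int) Int) (k : Int × Int)
    (h : m.getD k 0 > 0) : m.contains k = true := by
  cases hc : m.contains k
  · rw [PySem.Dict.getD_of_not_contains m 0 hc] at h
    omega
  · rfl

theorem pv_keys_removeOne (ks : List (Int × Int)) (m : PySem.Dict (Int × Int) Int) :
    (removeOne ks m).keys = m.keys := by
  induction ks with
  | nil => rfl
  | cons k rest ih =>
    by_cases h : m.getD k 0 > 0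
    · simp only [removeOne, if_pos h]
      rw [PySem.Dict.keys_modify]
      exact PySem.Dict.keys_insert_of_contains m _ (pv_contains_of_getD_pos m k h)
    · simp only [removeOne, if_neg h]
      exact ih

theorem pv_getD_removeOne_notmem (ks : List (Int × Int)) (m : PySem.Dict (Int × Int) Int)
    (k : Int × Int) (h : k ∉ ks) : (removeOne ks m).getD k 0 = m.getD k 0 := by
  induction ks with
  | nil => rfl
  | cons k' rest ih =>
    have hne : k ≠ k' := fun he => h (he ▸ List.mem_cons_self)
    by_cases hv : m.getD k' 0 > 0
    · simp only [removeOne, if_pos hv]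
      exact PySem.Dict.getD_modify_of_ne m 0 _ hne
    · simp only [removeOne, if_neg hv]
      exact ih (fun hm => h (List.mem_cons_of_mem _ hm))

theorem pv_batch_congr (ks : List (Int × Int)) :
    ∀ (t : Int) (m1 m2 : PySem.Dict (Int × Int) Int),
      (∀ q, m1.getD q 0 = m2.getD q 0) →
      ∀ q, (batchRemove ks t m1).getD q 0 = (batchRemove ks t m2).getD q 0 := by
  induction ks with
  | nil => intro t m1 m2 h q; exact h q
  | cons k rest ih =>
    intro t m1 m2 h q
    by_cases ht : t ≤ 0
    · rw [pv_batch_nonpos _ _ _ ht, pv_batch_nonpos _ _ _ ht]; exact h q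
    · simp only [batchRemove, if_neg ht]
      rw [h k]
      apply ih
      intro q'
      rw [PySem.Dict.getD_modify, PySem.Dict.getD_modify]
      split
      · rw [h k]
      · exact h q'

theorem pv_iter_skip (k : Int × Int) (rest : List (Int × Int)) (hk : k ∉ rest) :
    ∀ (t : Nat) (m : PySem.Dict (Int × Int) Int), m.getD k 0 = 0 →
      (removeOne (k :: rest))^[t] m = (removeOne rest)^[t] m := by
  intro t
  induction t with
  | zero => intro m _; rfl
  | succ t ih =>
    intro m h0
    rw [Function.iterate_succ_apply, Function.iterate_succ_apply]
    have h1 : removeOne (k :: rest) m = removeOne rest m := by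
      simp [removeOne, h0]
    rw [h1]
    exact ih _ (by rw [pv_getD_removeOne_notmem rest m k hk, h0])

theorem pv_batch_step (k : Int × Int) (rest : List (Int × Int)) (t : Int)
    (m : PySem.Dict (Int × Int) Int) (ht : 0 ≤ t) (hv : 0 < m.getD k 0) :
    ∀ q, (batchRemove (k :: rest) t (m.modify k 0 (· - 1))).getD q 0
        = (batchRemove (k :: rest) (t + 1) m).getD q 0 := by
  intro q
  by_cases ht0 : t ≤ 0
  · have h0 : t = 0 := le_antisymm ht0 ht
    subst h0
    rw [pv_batch_nonpos _ _ _ le_rfl]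
    simp only [batchRemove, if_neg (show ¬ ((0 : Int) + 1 ≤ 0) by omega)]
    rw [show min ((0 : Int) + 1) (m.getD k 0) = 1 from by omega]
    rw [pv_batch_nonpos _ _ _ (by omega)]
  · simp only [batchRemove, if_neg ht0, if_neg (show ¬ (t + 1 ≤ 0) by omega)]
    rw [PySem.Dict.getD_modify_self]
    rw [show min (t + 1) (m.getD k 0) = min t (m.getD k 0 - 1) + 1 from by omega]
    rw [show t + 1 - (min t (m.getD k 0 - 1) + 1) = t - min t (m.getD k 0 - 1) from by ring]
    apply pv_batch_congr
    intro q'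
    by_cases hqk : q' = k
    · subst hqk
      rw [PySem.Dict.getD_modify_self, PySem.Dict.getD_modify_self,
        PySem.Dict.getD_modify_self]
      ring
    · rw [PySem.Dict.getD_modify_of_ne _ 0 _ hqk, PySem.Dict.getD_modify_of_ne _ 0 _ hqk,
        PySem.Dict.getD_modify_of_ne _ 0 _ hqk]

theorem pv_batch_cons_zero (k : Int × Int) (rest : List (Int × Int)) (t : Int)
    (m : PySem.Dict (Int × Int) Int) (ht : 0 < t) (hv0 : m.getD k 0 = 0) :
    ∀ q, (batchRemove (k :: rest) t m).getD q 0 = (batchRemove rest t m).getD q 0 := by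
  intro q
  simp only [batchRemove, if_neg (show ¬ t ≤ 0 by omega)]
  rw [hv0, show min t 0 = 0 from by omega, sub_zero]
  apply pv_batch_congr
  intro q'
  by_cases hqk : q' = k
  · subst hqk
    rw [PySem.Dict.getD_modify_self, hv0]
    omega
  · rw [PySem.Dict.getD_modify_of_ne _ 0 _ hqk]

theorem pv_iter_eq_batch :
    ∀ ks : List (Int × Int), ks.Nodup → ∀ (t : Nat) (m : PySem.Dict (Int × Int) Int),
      (∀ q, 0 ≤ m.getD q 0) →
      ∀ q, ((removeOne ks)^[t] m).getD q 0 = (batchRemove ks (t : Int) m).getD q 0 := by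
  intro ks
  induction ks with
  | nil =>
    intro _ t m _ q
    have hid : (removeOne ([] : List (Int × Int)))^[t] m = m := by
      induction t with
      | zero => rfl
      | succ t ih => rw [Function.iterate_succ_apply]; exact ih
    rw [hid]; rfl
  | cons k rest ih =>
    intro hnd
    have hkrest : k ∉ rest := (List.nodup_cons.1 hnd).1
    have hndr : rest.Nodup := (List.nodup_cons.1 hnd).2
    intro t
    induction t with
    | zero =>
      intro m _ q
      rw [Function.iterate_zero_apply, pv_batch_nonpos _ _ _ (by simp)]
    | succ t iht =>
      intro m hm q
      have hcast : ((t + 1 : Nat) : Int) = (t : Int) + 1 := by push_cast; ring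
      by_cases hv : 0 < m.getD k 0
      · rw [Function.iterate_succ_apply]
        have h1 : removeOne (k :: rest) m = m.modify k 0 (· - 1) := by
          simp [removeOne, hv]
        rw [h1]
        have hm' : ∀ q', 0 ≤ (m.modify k 0 (· - 1)).getD q' 0 := by
          intro q'
          rw [PySem.Dict.getD_modify]
          split
          · next he => omega
          · exact hm q'
        rw [iht (m.modify k 0 (· - 1)) hm' q]
        rw [pv_batch_step k rest (t : Int) m (Int.natCast_nonneg t) hv q, hcast]
      · have hv0 : m.getD k 0 = 0 := le_antisymm (not_lt.1 hv) (hm k)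
        rw [pv_iter_skip k rest hkrest (t + 1) m hv0]
        rw [ih hndr (t + 1) m hm q, hcast]
        exact (pv_batch_cons_zero k rest ((t : Int) + 1) m (by omega) hv0 q).symm

theorem pv_ionLoopA_iter (c : Int) (m0 : PySem.Dict (Int × Int) Int) :
    ionLoopA c m0
      = (fun m : PySem.Dict (Int × Int) Int =>
          removeOne (PySem.List.sorted2 m.keys (·.1) (·.2) true) m)^[(PySem.List.pyRange 0 c 1).length] m0 := by
  rw [ionLoopA]
  generalize PySem.List.pyRange 0 c 1 = l
  induction l generalizing m0 with
  | nil => rfl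
  | cons x l ih =>
    rw [List.foldl_cons, List.length_cons, Function.iterate_succ_apply]
    exact ih _

theorem pv_ionIter :
    ∀ (t : Nat) (m : PySem.Dict (Int × Int) Int),
      (fun m : PySem.Dict (Int × Int) Int =>
          removeOne (PySem.List.sorted2 m.keys (·.1) (·.2) true) m)^[t] m
        = (removeOne (PySem.List.sorted2 m.keys (·.1) (·.2) true))^[t] m := by
  intro t
  induction t with
  | zero => intro m; rfl
  | succ t ih =>
    intro m
    rw [Function.iterate_succ_apply, Function.iterate_succ_apply]
    have h2 := ih (removeOne (PySem.List.sorted2 m.keys (·.1) (·.2) true) m)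
    rw [pv_keys_removeOne] at h2
    exact h2

theorem pv_ionLoop_eq_batch (c : Int) (m0 : PySem.Dict (Int × Int) Int)
    (hm : ∀ q, 0 ≤ m0.getD q 0)
    (hnd : (PySem.List.sorted2 m0.keys (·.1) (·.2) true).Nodup) :
    ∀ q, (ionLoopA c m0).getD q 0
        = (batchRemove (PySem.List.sorted2 m0.keys (·.1) (·.2) true) c m0).getD q 0 := by
  intro q
  by_cases hc : c ≤ 0
  · rw [ionLoopA, PySem.List.pyRange_one_eq_nil hc, List.foldl_nil,
      pv_batch_nonpos _ _ _ hc]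
  · rw [pv_ionLoopA_iter, PySem.List.length_pyRange_one, pv_ionIter]
    have h2 := pv_iter_eq_batch _ hnd (c - 0).toNat m0 hm q
    rw [show (((c - 0).toNat : Nat) : Int) = c from by omega] at h2
    exact h2

-- ---- batchRemove over the sorted keys equals B's one-pass drain, read back per key ----

theorem pv_getD_batch_notmem (ks : List (Int × Int)) :
    ∀ (t : Int) (m : PySem.Dict (Int × Int) Int) (k : Int × Int), k ∉ ks →
      (batchRemove ks t m).getD k 0 = m.getD k 0 := by
  induction ks with
  | nil => intro t m k _; rfl
  | cons k' rest ih =>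
    intro t m k hk
    have hne : k ≠ k' := fun he => hk (he ▸ List.mem_cons_self)
    by_cases ht : t ≤ 0
    · simp [batchRemove, ht]
    · simp only [batchRemove, if_neg ht]
      rw [ih _ _ k (fun hm => hk (List.mem_cons_of_mem _ hm))]
      exact PySem.Dict.getD_modify_of_ne m 0 _ hne

theorem pv_lookupB_cons_self (k : Int × Int) (v : Int) (rest : List ((Int × Int) × Int)) (d : Int) :
    lookupB ((k, v) :: rest) k d = v := by
  simp [lookupB, List.find?_cons_of_pos]

theorem pv_lookupB_cons_ne (k k' : Int × Int) (h : k' ≠ k) (v : Int) (rest : List ((Int × Int) × Int)) (d : Int) :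
    lookupB ((k, v) :: rest) k' d = lookupB rest k' d := by
  have : ((k, v).1 == k') = false := by simpa using fun he => h (by rw [he])
  simp [lookupB, this]

theorem pv_batch_drain :
    ∀ (ts : List (Int × Int × Int)) (rem : Int) (m : PySem.Dict (Int × Int) Int),
      (ts.map pvKey).Nodup → (∀ t ∈ ts, m.getD (pvKey t) 0 = t.2.2) →
      ∀ t ∈ ts, (batchRemove (ts.map pvKey) rem m).getD (pvKey t) 0
          = lookupB (drainB ts rem) (pvKey t) t.2.2 := by
  intro ts
  induction ts with
  | nil => intro rem m _ _ t ht; exact absurd ht List.not_mem_nil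
  | cons t0 rest ih =>
    intro rem m hnd hval t ht
    obtain ⟨n, l, occ⟩ := t0
    have hk0 : pvKey (n, l, occ) = (n, l) := rfl
    have hnd' : (n, l) ∉ rest.map pvKey := (List.nodup_cons.1 (by simpa using hnd)).1
    have hndr : (rest.map pvKey).Nodup := (List.nodup_cons.1 (by simpa using hnd)).2
    have hocc : m.getD (n, l) 0 = occ := hval (n, l, occ) List.mem_cons_self
    have hne_of_mem : ∀ t' ∈ rest, pvKey t' ≠ (n, l) := by
      intro t' ht' he
      exact hnd' (he ▸ List.mem_map_of_mem ht')
    by_cases hrem : rem ≤ 0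
    · rw [show drainB ((n, l, occ) :: rest) rem = ((n, l), occ) :: drainB rest rem from by
        simp [drainB, hrem]]
      rw [pv_batch_nonpos _ _ _ hrem]
      rcases List.mem_cons.1 ht with he | hmem
      · subst he
        rw [hk0, pv_lookupB_cons_self, hocc]
      · rw [pv_lookupB_cons_ne _ _ (hne_of_mem t hmem)]
        have := ih rem m hndr (fun t' ht' => hval t' (List.mem_cons_of_mem _ ht')) t hmem
        rw [pv_batch_nonpos _ _ _ hrem] at this
        exact this
    · rw [show drainB ((n, l, occ) :: rest) rem
            = ((n, l), occ - min rem occ) :: drainB rest (rem - min rem occ) from by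
        simp [drainB, hrem]]
      rw [show batchRemove (((n, l, occ) :: rest).map pvKey) rem m
            = batchRemove (rest.map pvKey) (rem - min rem occ)
                (m.modify (n, l) 0 (· - min rem occ)) from by
        simp [batchRemove, hrem, hk0, hocc]]
      have hval' : ∀ t' ∈ rest, (m.modify (n, l) 0 (· - min rem occ)).getD (pvKey t') 0 = t'.2.2 := by
        intro t' ht'
        rw [PySem.Dict.getD_modify_of_ne _ 0 _ (hne_of_mem t' ht')]
        exact hval t' (List.mem_cons_of_mem _ ht')
      rcases List.mem_cons.1 ht with he | hmem
      · subst he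
        rw [hk0, pv_getD_batch_notmem _ _ _ _ hnd', PySem.Dict.getD_modify_self, hocc,
          pv_lookupB_cons_self]
      · rw [pv_lookupB_cons_ne _ _ (hne_of_mem t hmem)]
        exact ih (rem - min rem occ) _ hndr hval' t hmem

-- ---- the occupancy map never holds a negative value ----

theorem pv_vcmap_aux :
    ∀ (l : List (Int × Int × Int)) (d : PySem.Dict (Int × Int) Int),
      (∀ q, 0 ≤ d.getD q 0) → (∀ t ∈ l, (0 : Int) ≤ t.2.2) →
      ∀ q, 0 ≤ (l.foldl (fun d t => d.insert (t.1, t.2.1) t.2.2) d).getD q 0 := by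
  intro l
  induction l with
  | nil => intro d hd _ q; exact hd q
  | cons t l ih =>
    intro d hd hl q
    rw [List.foldl_cons]
    apply ih
    · intro q'
      rw [PySem.Dict.getD_insert]
      split
      · exact hl t List.mem_cons_self
      · exact hd q'
    · intro t' ht'; exact hl t' (List.mem_cons_of_mem _ ht')

theorem pv_vcmap_nonneg (vc : List (Int × Int × Int)) (hvc : ∀ t ∈ vc, (0 : Int) ≤ t.2.2) :
    ∀ q, 0 ≤ (pvVcMap vc).getD q 0 := by
  apply pv_vcmap_aux vc PySem.Dict.empty _ hvc
  intro q
  rw [PySem.Dict.getD_empty]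

-- ---- strings: ''.join(map) equals the accumulating foldl ----

theorem pv_foldl_append_pull (r : List (List Char)) :
    ∀ (x y : List Char), r.foldl (· ++ ·) (x ++ y) = x ++ r.foldl (· ++ ·) y := by
  induction r with
  | nil => intro x y; rfl
  | cons z rest ih =>
    intro x y
    rw [List.foldl_cons, List.foldl_cons, List.append_assoc]
    exact ih x (y ++ z)

theorem pv_chars_join0 : ∀ (l : List (List Char)), PySem.Chars.join [] l = l.foldl (· ++ ·) [] := by
  intro l
  induction l with
  | nil => exact PySem.Chars.join_nil []
  | cons x rest ih =>
    cases rest with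
    | nil => rw [PySem.Chars.join_singleton]; simp
    | cons y rest' =>
      rw [PySem.Chars.join_cons_cons, ih, List.foldl_cons]
      have := pv_foldl_append_pull (y :: rest') x []
      simp only [List.append_nil, List.nil_append] at this ⊢
      exact this.symm

theorem pv_toList_foldl (l : List String) :
    ∀ acc : String, (l.foldl (· ++ ·) acc).toList = (l.map String.toList).foldl (· ++ ·) acc.toList := by
  induction l with
  | nil => intro acc; rfl
  | cons x rest ih =>
    intro acc
    rw [List.foldl_cons, List.map_cons, List.foldl_cons, ih, String.toList_append]

theorem pv_join_eq_foldl (l : List String) : PySem.Str.join "" l = l.foldl (· ++ ·) "" := by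
  apply String.toList_inj.mp
  rw [PySem.Str.toList_join, pv_toList_foldl]
  exact pv_chars_join0 (l.map String.toList)

-- ---- SHELLS[l] as a string slice vs as a letter tuple, for the l the pipeline reaches ----

theorem pv_partstr_eq (t : Int × Int × Int) (h0 : 0 ≤ t.2.1) (h7 : t.2.1 < 7) :
    pvPartStr t = "." ++ PySem.Int.toStr t.1 ++ (PySem.List.pyGet? pvShellLettersB t.2.1).getD "" ++ PySem.Int.toStr t.2.2 := by
  obtain ⟨n, l, occ⟩ := t
  simp only at h0 h7
  have hl : l = 0 ∨ l = 1 ∨ l = 2 ∨ l = 3 ∨ l = 4 ∨ l = 5 ∨ l = 6 := by omega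
  rcases hl with h | h | h | h | h | h | h <;> subst h <;> rfl

-- ---- A's tallying foldl as filter + sums + string fold ----

theorem pv_tail3 :
    ∀ (l : List (Int × Int × Int)) (a b : Int) (c : String),
      l.foldl (fun acc t =>
          if t.2.2 ≠ 0 then
            (acc.1 + min t.2.2 (4 * t.2.1 + 2 - t.2.2), acc.2.1 + t.2.2, acc.2.2 ++ pvPartStr t)
          else acc) (a, b, c)
        = (a + ((l.filter (fun t => t.2.2 ≠ 0)).map (fun t => min t.2.2 (4 * t.2.1 + 2 - t.2.2))).sum,
           b + ((l.filter (fun t => t.2.2 ≠ 0)).map (fun t => t.2.2)).sum,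
           (l.filter (fun t => t.2.2 ≠ 0)).foldl (fun acc t => acc ++ pvPartStr t) c) := by
  intro l
  induction l with
  | nil => intro a b c; simp
  | cons t l ih =>
    intro a b c
    by_cases h : t.2.2 = 0
    · simp only [List.foldl_cons, List.filter_cons,
        if_neg (show ¬ t.2.2 ≠ 0 from by simp [h]),
        if_neg (show ¬ (decide (t.2.2 ≠ 0) = true) from by simp [h])]
      exact ih a b c
    · simp only [List.foldl_cons, List.filter_cons,
        if_pos (show t.2.2 ≠ 0 from h),
        if_pos (show decide (t.2.2 ≠ 0) = true from by simp [h]),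
        List.map_cons, List.sum_cons]
      rw [ih]
      simp [add_assoc]

-- ---- main equivalence ----

theorem pv_main : ∀ (a c : Int), 1 ≤ a → a ≤ 118 →
    estimate_ion_valence_shells a c = estimate_ion_valence_shells_alt a c := by
  intro a c h1 h2
  have hk : (a - 1).toNat ∈ List.range 118 := List.mem_range.mpr (by omega)
  have hb := pv_bundle_ok _ hk
  rw [show (((a - 1).toNat : Nat) : Int) + 1 = a from by omega] at hb
  simp only [pvBundle, Bool.and_eq_true, beq_iff_eq, List.all_eq_true, decide_eq_true_eq,
    Bool.and_eq_true] at hb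
  obtain ⟨⟨⟨⟨hvcB, hkeys⟩, hnd⟩, hval⟩, hbounds⟩ := hb
  have hval' : ∀ t ∈ PySem.List.sorted2 (estimate_valence_configuration a) (·.1) (·.2.1) true,
      (pvVcMap (estimate_valence_configuration a)).getD (pvKey t) 0 = t.2.2 := by
    intro t ht; exact hval t ht
  have hocc0 : ∀ t ∈ estimate_valence_configuration a, (0 : Int) ≤ t.2.2 := by
    intro t ht; exact (hbounds t ht).1.1
  have hm0 : ∀ q, 0 ≤ (pvVcMap (estimate_valence_configuration a)).getD q 0 :=
    pv_vcmap_nonneg _ hocc0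
  have hdrain : ∀ t ∈ estimate_valence_configuration a,
      (ionLoopA c (pvVcMap (estimate_valence_configuration a))).getD (t.1, t.2.1) 0
        = lookupB (drainB (PySem.List.sorted2 (estimate_valence_configuration a) (·.1) (·.2.1) true) c) (t.1, t.2.1) t.2.2 := by
    intro t ht
    have hts : t ∈ PySem.List.sorted2 (estimate_valence_configuration a) (·.1) (·.2.1) true :=
      ((PySem.List.sorted2_perm (estimate_valence_configuration a) (·.1) (·.2.1) true).mem_iff).mpr ht
    have he := pv_ionLoop_eq_batch c (pvVcMap (estimate_valence_configuration a)) hm0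
      (by rw [hkeys]; exact hnd) (t.1, t.2.1)
    rw [he, hkeys]
    exact pv_batch_drain _ c _ hnd hval' t hts
  -- both sides
  simp only [estimate_ion_valence_shells, estimate_ion_valence_shells_alt]
  rw [← hvcB]
  have hif : (if c ≠ 0 then
        (estimate_valence_configuration a).map
          (fun t => (t.1, t.2.1,
            (ionLoopA c (pvVcMap (estimate_valence_configuration a))).getD (t.1, t.2.1) 0))
      else estimate_valence_configuration a)
      = (if c ≠ 0 then
        (estimate_valence_configuration a).map
          (fun p => (p.1, p.2.1,
            lookupB (drainB (PySem.List.sorted2 (estimate_valence_configuration a) (·.1) (·.2.1) true) c) (p.1, p.2.1) p.2.2))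
      else estimate_valence_configuration a) := by
    by_cases hc : c ≠ 0
    · rw [if_pos hc, if_pos hc]
      exact List.map_congr_left (fun t ht => by rw [hdrain t ht])
    · rw [if_neg hc, if_neg hc]
  rw [hif]
  -- l-bounds survive the charge branch (the map keeps n and l)
  have hbounds' : ∀ t ∈ (if c ≠ 0 then
        (estimate_valence_configuration a).map
          (fun p => (p.1, p.2.1,
            lookupB (drainB (PySem.List.sorted2 (estimate_valence_configuration a) (·.1) (·.2.1) true) c) (p.1, p.2.1) p.2.2))
      else estimate_valence_configuration a), (0 : Int) ≤ t.2.1 ∧ t.2.1 < 7 := by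
    intro t ht
    by_cases hc : c ≠ 0
    · rw [if_pos hc] at ht
      obtain ⟨p, hp, he⟩ := List.mem_map.1 ht
      have := hbounds p hp
      subst he
      exact ⟨this.1.2, this.2⟩
    · rw [if_neg hc] at ht
      have := hbounds t ht
      exact ⟨this.1.2, this.2⟩
  generalize hvc' : (if c ≠ 0 then
        (estimate_valence_configuration a).map
          (fun p => (p.1, p.2.1,
            lookupB (drainB (PySem.List.sorted2 (estimate_valence_configuration a) (·.1) (·.2.1) true) c) (p.1, p.2.1) p.2.2))
      else estimate_valence_configuration a) = vc' at hbounds' ⊢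
  rw [pv_tail3]
  have hpb : ∀ t ∈ vc'.filter (fun t => t.2.2 ≠ 0), (0 : Int) ≤ t.2.1 ∧ t.2.1 < 7 :=
    fun t ht => hbounds' t (List.mem_of_mem_filter ht)
  have hstr : PySem.Str.join "" ((vc'.filter (fun t => t.2.2 ≠ 0)).map
        (fun p => "." ++ PySem.Int.toStr p.1 ++ (PySem.List.pyGet? pvShellLettersB p.2.1).getD "" ++ PySem.Int.toStr p.2.2))
      = (vc'.filter (fun t => t.2.2 ≠ 0)).foldl (fun acc t => acc ++ pvPartStr t) "" := by
    rw [pv_join_eq_foldl, List.foldl_map]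
    exact PySem.List.foldl_congr_mem _ _ _ _
      (fun acc t ht => by rw [pv_partstr_eq t (hpb t ht).1 (hpb t ht).2])
  rw [pv_elems_eq] at *
  simp only [zero_add]
  rw [← hstr]

-- ===== VERDICT (by name: the statement is the Claim_ definition above) =====
theorem estimate_ion_valence_shells_spec : Claim_equal_estimate_ion_valence_shells := by
  intro a c _ hpre
  unfold Spec_estimate_ion_valence_shells
  exact pv_main a c hpre.1 hpre.2.1
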